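-- pv_equiv track=rewrite | github.com/981377660LMT/algorithm-study | 7_graph/bfs求无权图的最短路径/多维度bfs/LCP 79. 提取咒文.py | extractMantra
-- ===== SOURCE A (Python) =====
-- from collections import deque
-- from typing import List
--
-- INF = int(1e18)
--
-- DIR4 = [(0, 1), (0, -1), (1, 0), (-1, 0)]
--
-- def extractMantra(matrix: List[str], mantra: str) -> int:
--     ROW, COL, n = len(matrix), len(matrix[0]), len(mantra)
--     dist = [[INF] * (n + 1) for _ in range(ROW * COL)]
--     dist[0][0] = 0
--     queue = deque([(0, 0, 0, 0)])  # (step, index, x, y)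
--     while queue:
--         step, index, x, y = queue.popleft()
--         if index == n:
--             continue
--         if step > dist[x * COL + y][index]:
--             continue
--
--         if matrix[x][y] == mantra[index]:  # !提取
--             cand = step + 1
--             if cand < dist[x * COL + y][index + 1]:
--                 dist[x * COL + y][index + 1] = cand
--                 queue.append((step + 1, index + 1, x, y))  # type: ignore
--
--         for dx, dy in DIR4:  # !移动
--             nx, ny = x + dx, y + dy
--             if 0 <= nx < ROW and 0 <= ny < COL:
--                 cand = step + 1
--                 if cand < dist[nx * COL + ny][index]:
--                     dist[nx * COL + ny][index] = cand
--                     queue.append((cand, index, nx, ny))  # type: ignore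
--
--     res = min(d[n] for d in dist)
--     return res if res < INF else -1
-- ===== SOURCE B (Python) =====
-- INF = int(1e18)
--
-- DIR4 = [(0, 1), (0, -1), (1, 0), (-1, 0)]
--
-- def extractMantra(matrix, mantra):
--     ROW, COL, n = len(matrix), len(matrix[0]), len(mantra)
--     # dist[i][c]: shortest steps to stand on cell c having extracted i characters.
--     dist = [[INF] * (ROW * COL) for _ in range(n + 1)]
--     dist[0][0] = 0
--     # Gauss-Seidel relaxation sweeps to the fixpoint (Bellman-Ford style): no queue.
--     changed = True
--     while changed:
--         changed = False
--         for i in range(n + 1):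
--             for x in range(ROW):
--                 for y in range(COL):
--                     c = x * COL + y
--                     if i > 0 and matrix[x][y] == mantra[i - 1] and dist[i - 1][c] + 1 < dist[i][c]:
--                         dist[i][c] = dist[i - 1][c] + 1
--                         changed = True
--                     if i < n:
--                         for dx, dy in DIR4:
--                             px, py = x + dx, y + dy
--                             if 0 <= px < ROW and 0 <= py < COL and dist[i][px * COL + py] + 1 < dist[i][c]:
--                                 dist[i][c] = dist[i][px * COL + py] + 1
--                                 changed = True
--     res = min(dist[n])
--     return res if res < INF else -1
-- ===== Notes on version B (the rewrite author's own statement) =====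
-- stated objective: alternative
-- what changed: A runs a deque-based BFS over (cell,index) states with per-entry step counters and a staleness check; B has no queue or frontier at all: it keeps a transposed layer-major distance table and runs Bellman-Ford-style Gauss-Seidel relaxation sweeps over all (layer,cell) pairs until a whole sweep makes no change (chaotic iteration to the same least fixpoint).
import Mathlib
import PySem

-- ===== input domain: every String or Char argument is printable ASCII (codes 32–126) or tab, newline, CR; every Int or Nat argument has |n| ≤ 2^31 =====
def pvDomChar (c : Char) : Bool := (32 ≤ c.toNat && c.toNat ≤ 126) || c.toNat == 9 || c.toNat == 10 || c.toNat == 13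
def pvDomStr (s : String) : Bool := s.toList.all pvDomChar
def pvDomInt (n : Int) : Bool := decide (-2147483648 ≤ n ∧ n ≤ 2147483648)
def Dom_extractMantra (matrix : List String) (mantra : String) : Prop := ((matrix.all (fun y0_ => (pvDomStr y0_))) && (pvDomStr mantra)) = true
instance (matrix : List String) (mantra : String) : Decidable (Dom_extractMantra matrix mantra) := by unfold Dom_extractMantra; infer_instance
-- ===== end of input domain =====

-- B replaces A's deque BFS over (cell,index) states by a queue-free dynamic-programming
-- fixpoint iteration: a transposed layer-major distance table relaxed by repeated
-- Gauss-Seidel sweeps over all (layer,cell) pairs until a whole sweep changes nothing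
-- (objective: alternative algorithm — chaotic iteration to the same least fixpoint).

-- ===== PORT A =====
-- helpers shared by both ports (the same Python expressions occur verbatim in Source A and Source B)
def pvINF : Nat := 1000000000000000000
def pvDIR4 : List (Int × Int) := [(0, 1), (0, -1), (1, 0), (-1, 0)]
-- x * COL + y as a list index (x, y are in the grid box whenever reached under Pre_)
def pvCell (COL : Nat) (x y : Int) : Nat := (x * (COL : Int) + y).toNat
-- matrix[x][y]; in range on every state reached under Pre_, so the defaults never show
def pvChar (grid : List (List Char)) (x y : Int) : Char := (grid.getD x.toNat []).getD y.toNat ' '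
-- dist[c][i] / dist[c][i] = v / sum of all entries (termination measure)
def dget (d : List (List Nat)) (c i : Nat) : Nat := (d.getD c []).getD i 0
def dset (d : List (List Nat)) (c i v : Nat) : List (List Nat) := d.set c ((d.getD c []).set i v)
def dsum (d : List (List Nat)) : Nat := (d.map List.sum).sum
def pvMeas {α : Type} (st : List (List Nat) × List α) : Nat := 2 * dsum st.1 + st.2.length

-- termination bookkeeping (cited by decreasing_by of the loops below)
theorem rowsum_set (row : List Nat) (i v : Nat) (h : v < row.getD i 0) :
    (row.set i v).sum + row.getD i 0 = row.sum + v := by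
  induction row generalizing i with
  | nil => simp [List.getD] at h
  | cons a t ih =>
    cases i with
    | zero => simp [List.getD]; omega
    | succ j =>
      have h' : v < t.getD j 0 := by simpa [List.getD] using h
      have := ih j h'
      simp [List.getD] at this ⊢
      omega

theorem dsum_dset {d : List (List Nat)} {c i v : Nat} (h : v < dget d c i) :
    dsum (dset d c i v) + dget d c i = dsum d + v := by
  induction d generalizing c with
  | nil => simp [dget, List.getD] at h
  | cons r t ih =>
    cases c with
    | zero =>
      have h' : v < r.getD i 0 := by simpa [dget, List.getD] using h
      have := rowsum_set r i v h'
      simp [dsum, dset, dget, List.getD]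
      simp at this ⊢
      omega
    | succ c' =>
      have h' : v < dget t c' i := by simpa [dget, List.getD] using h
      have := ih h'
      simp [dsum, dset, dget, List.getD] at this ⊢
      omega

def pvMoveA (ROW COL step index : Nat) (x y : Int)
    (st : List (List Nat) × List (Nat × Nat × Int × Int)) (dxy : Int × Int) :
    List (List Nat) × List (Nat × Nat × Int × Int) :=
  if 0 ≤ x + dxy.1 ∧ x + dxy.1 < (ROW : Int) ∧ 0 ≤ y + dxy.2 ∧ y + dxy.2 < (COL : Int) ∧
      step + 1 < dget st.1 (pvCell COL (x + dxy.1) (y + dxy.2)) index then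
    (dset st.1 (pvCell COL (x + dxy.1) (y + dxy.2)) index (step + 1),
      st.2 ++ [(step + 1, index, x + dxy.1, y + dxy.2)])
  else st

-- the "!提取" (extract) update of A
def pvExtA (grid : List (List Char)) (man : List Char) (COL step index : Nat) (x y : Int)
    (st : List (List Nat) × List (Nat × Nat × Int × Int)) :
    List (List Nat) × List (Nat × Nat × Int × Int) :=
  if pvChar grid x y = man.getD index ' ' ∧ step + 1 < dget st.1 (pvCell COL x y) (index + 1)
  then (dset st.1 (pvCell COL x y) (index + 1) (step + 1), st.2 ++ [(step + 1, index + 1, x, y)])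
  else st

-- one iteration of A's while loop on a popped (step, index, x, y)
def pvStepA (grid : List (List Char)) (man : List Char) (ROW COL n : Nat)
    (st : List (List Nat) × List (Nat × Nat × Int × Int)) (e : Nat × Nat × Int × Int) :
    List (List Nat) × List (Nat × Nat × Int × Int) :=
  if e.2.1 = n then st
  else if dget st.1 (pvCell COL e.2.2.1 e.2.2.2) e.2.1 < e.1 then st
  else pvDIR4.foldl (pvMoveA ROW COL e.1 e.2.1 e.2.2.1 e.2.2.2)
    (pvExtA grid man COL e.1 e.2.1 e.2.2.1 e.2.2.2 st)

theorem pvMoveA_meas (ROW COL step index : Nat) (x y : Int) (st : _) (dxy : Int × Int) :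
    pvMeas (pvMoveA ROW COL step index x y st dxy) ≤ pvMeas st := by
  unfold pvMoveA pvMeas
  split
  · rename_i h
    have := dsum_dset h.2.2.2.2
    simp
    omega
  · exact le_refl _

theorem foldl_meas {α β : Type} (f : (List (List Nat) × List α) → β → (List (List Nat) × List α))
    (hf : ∀ st dxy, pvMeas (f st dxy) ≤ pvMeas st) :
    ∀ (l : List β) (st : List (List Nat) × List α), pvMeas (List.foldl f st l) ≤ pvMeas st := by
  intro l
  induction l with
  | nil => intro st; simp
  | cons a t ih => intro st; exact le_trans (ih (f st a)) (hf st a)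

theorem pvExtA_meas (grid : List (List Char)) (man : List Char) (COL step index : Nat)
    (x y : Int) (st : List (List Nat) × List (Nat × Nat × Int × Int)) :
    pvMeas (pvExtA grid man COL step index x y st) ≤ pvMeas st := by
  unfold pvExtA pvMeas
  split
  · rename_i h
    have := dsum_dset h.2
    simp
    omega
  · exact le_refl _

theorem pvStepA_meas (grid : List (List Char)) (man : List Char) (ROW COL n : Nat)
    (st : List (List Nat) × List (Nat × Nat × Int × Int)) (e : Nat × Nat × Int × Int) :
    pvMeas (pvStepA grid man ROW COL n st e) ≤ pvMeas st := by
  unfold pvStepA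
  split
  · exact le_refl _
  · split
    · exact le_refl _
    · exact le_trans (foldl_meas _ (pvMoveA_meas ROW COL e.1 e.2.1 e.2.2.1 e.2.2.2) _ _)
        (pvExtA_meas grid man COL e.1 e.2.1 e.2.2.1 e.2.2.2 st)

def pvLoopA (grid : List (List Char)) (man : List Char) (ROW COL n : Nat)
    (dist : List (List Nat)) (queue : List (Nat × Nat × Int × Int)) : List (List Nat) :=
  match queue with
  | [] => dist
  | e :: rest =>
    let st := pvStepA grid man ROW COL n (dist, rest) e
    pvLoopA grid man ROW COL n st.1 st.2
termination_by 2 * dsum dist + queue.length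
decreasing_by
  have := pvStepA_meas grid man ROW COL n (dist, rest) e
  simp only [pvMeas, List.length_cons] at this ⊢
  omega

-- res = min(d[n] for d in dist); res if res < INF else -1  (min on [] raises → outside Pre_)
def pvFinish (n : Nat) (dist : List (List Nat)) : Int :=
  match PySem.List.min? (dist.map (fun r => r.getD n 0)) (fun v => v) with
  | some res => if res < pvINF then (res : Int) else -1
  | none => -1

def extractMantra (matrix : List String) (mantra : String) : Int :=
  let grid := matrix.map String.toList
  let man := mantra.toList
  let ROW := grid.length
  let COL := (grid.headD []).length
  let n := man.length
  let dist0 := dset (List.replicate (ROW * COL) (List.replicate (n + 1) pvINF)) 0 0 0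
  pvFinish n (pvLoopA grid man ROW COL n dist0 [(0, 0, 0, 0)])

-- ===== PORT B =====
-- B's table is layer-major: dget d i c = dist[i][c].  One conditional Gauss-Seidel
-- relaxation `if i > 0 and matrix[x][y] == mantra[i-1] and dist[i-1][c]+1 < dist[i][c]: …`
def pvRelaxExtB (grid : List (List Char)) (man : List Char) (COL i : Nat) (x y : Int)
    (st : List (List Nat) × Bool) : List (List Nat) × Bool :=
  if 0 < i ∧ pvChar grid x y = man.getD (i - 1) ' ' ∧
      dget st.1 (i - 1) (pvCell COL x y) + 1 < dget st.1 i (pvCell COL x y) then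
    (dset st.1 i (pvCell COL x y) (dget st.1 (i - 1) (pvCell COL x y) + 1), true)
  else st

-- `if 0 <= px < ROW and 0 <= py < COL and dist[i][px*COL+py]+1 < dist[i][c]: …`
def pvRelaxMoveB (ROW COL i : Nat) (x y : Int)
    (st : List (List Nat) × Bool) (dxy : Int × Int) : List (List Nat) × Bool :=
  if 0 ≤ x + dxy.1 ∧ x + dxy.1 < (ROW : Int) ∧ 0 ≤ y + dxy.2 ∧ y + dxy.2 < (COL : Int) ∧
      dget st.1 i (pvCell COL (x + dxy.1) (y + dxy.2)) + 1 < dget st.1 i (pvCell COL x y) then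
    (dset st.1 i (pvCell COL x y) (dget st.1 i (pvCell COL (x + dxy.1) (y + dxy.2)) + 1), true)
  else st

-- the body of the y-loop at one (i, x, y)
def pvVisitB (grid : List (List Char)) (man : List Char) (ROW COL n i : Nat) (x y : Int)
    (st : List (List Nat) × Bool) : List (List Nat) × Bool :=
  let st1 := pvRelaxExtB grid man COL i x y st
  if i < n then pvDIR4.foldl (pvRelaxMoveB ROW COL i x y) st1 else st1

-- one full sweep `for i in range(n+1): for x in range(ROW): for y in range(COL): …`
def pvSweepB (grid : List (List Char)) (man : List Char) (ROW COL n : Nat)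
    (d : List (List Nat)) : List (List Nat) × Bool :=
  (List.range (n + 1)).foldl (fun st (i : Nat) =>
    (List.range ROW).foldl (fun st (x : Nat) =>
      (List.range COL).foldl (fun st (y : Nat) =>
        pvVisitB grid man ROW COL n i (x : Int) (y : Int) st) st) st) (d, false)

-- termination bookkeeping for the while-changed loop (cited by decreasing_by below)
theorem foldl_pres {S α : Type} (P : S → Prop) (f : S → α → S) (l : List α)
    (h : ∀ s a, a ∈ l → P s → P (f s a)) : ∀ s, P s → P (List.foldl f s l) := by
  induction l with
  | nil => intro s hs; simpa using hs
  | cons a t ih =>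
    intro s hs
    exact ih (fun s' a' ha' => h s' a' (by simp [ha'])) _ (h s a (by simp) hs)

theorem dsum_dset_lt {d : List (List Nat)} {c i v : Nat} (h : v < dget d c i) :
    dsum (dset d c i v) < dsum d := by
  have := dsum_dset h
  omega

def SweepP (d : List (List Nat)) (st : List (List Nat) × Bool) : Prop :=
  (st.1 = d ∧ st.2 = false) ∨ (st.2 = true ∧ dsum st.1 < dsum d)

theorem relaxExtB_SweepP (grid : List (List Char)) (man : List Char) (COL i : Nat)
    (x y : Int) (d : List (List Nat)) (st : List (List Nat) × Bool) (hp : SweepP d st) :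
    SweepP d (pvRelaxExtB grid man COL i x y st) := by
  unfold pvRelaxExtB
  split
  · rename_i h
    have hlt := dsum_dset_lt h.2.2
    rcases hp with ⟨h1, _⟩ | ⟨_, h2⟩
    · exact Or.inr ⟨rfl, by rw [← h1]; exact hlt⟩
    · exact Or.inr ⟨rfl, lt_trans hlt h2⟩
  · exact hp

theorem relaxMoveB_SweepP (ROW COL i : Nat) (x y : Int) (d : List (List Nat))
    (st : List (List Nat) × Bool) (dxy : Int × Int) (hp : SweepP d st) :
    SweepP d (pvRelaxMoveB ROW COL i x y st dxy) := by
  unfold pvRelaxMoveB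
  split
  · rename_i h
    have hlt := dsum_dset_lt h.2.2.2.2
    rcases hp with ⟨h1, _⟩ | ⟨_, h2⟩
    · exact Or.inr ⟨rfl, by rw [← h1]; exact hlt⟩
    · exact Or.inr ⟨rfl, lt_trans hlt h2⟩
  · exact hp

theorem visitB_SweepP (grid : List (List Char)) (man : List Char) (ROW COL n i : Nat)
    (x y : Int) (d : List (List Nat)) (st : List (List Nat) × Bool) (hp : SweepP d st) :
    SweepP d (pvVisitB grid man ROW COL n i x y st) := by
  unfold pvVisitB
  have h1 := relaxExtB_SweepP grid man COL i x y d st hp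
  split
  · exact foldl_pres (SweepP d) _ _ (fun s a _ hs => relaxMoveB_SweepP ROW COL i x y d s a hs) _ h1
  · exact h1

theorem sweepB_SweepP (grid : List (List Char)) (man : List Char) (ROW COL n : Nat)
    (d : List (List Nat)) : SweepP d (pvSweepB grid man ROW COL n d) := by
  unfold pvSweepB
  refine foldl_pres (SweepP d) _ _ (fun s i _ hs => ?_) _ (Or.inl ⟨rfl, rfl⟩)
  refine foldl_pres (SweepP d) _ _ (fun s x _ hs => ?_) _ hs
  exact foldl_pres (SweepP d) _ _
    (fun s (y : Nat) _ hs => visitB_SweepP grid man ROW COL n i (x : Int) (y : Int) d s hs) _ hs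

-- `while changed:` — repeat sweeps until a sweep reports no change
def pvLoopFixB (grid : List (List Char)) (man : List Char) (ROW COL n : Nat)
    (d : List (List Nat)) : List (List Nat) :=
  let r := pvSweepB grid man ROW COL n d
  if r.2 = true then pvLoopFixB grid man ROW COL n r.1 else r.1
termination_by dsum d
decreasing_by
  rename_i hr
  have hr' : (pvSweepB grid man ROW COL n d).2 = true := hr
  rcases sweepB_SweepP grid man ROW COL n d with ⟨_, h2⟩ | ⟨_, h2⟩
  · rw [hr'] at h2; exact absurd h2 (by simp)
  · exact h2

-- res = min(dist[n]); res if res < INF else -1  (min on [] raises → outside Pre_)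
def pvFinishB (n : Nat) (dist : List (List Nat)) : Int :=
  match PySem.List.min? (dist.getD n []) (fun v => v) with
  | some res => if res < pvINF then (res : Int) else -1
  | none => -1

def extractMantra_alt (matrix : List String) (mantra : String) : Int :=
  let grid := matrix.map String.toList
  let man := mantra.toList
  let ROW := grid.length
  let COL := (grid.headD []).length
  let n := man.length
  let dist0 := dset (List.replicate (n + 1) (List.replicate (ROW * COL) pvINF)) 0 0 0
  pvFinishB n (pvLoopFixB grid man ROW COL n dist0)

-- ===== PRECONDITION & SPEC =====
-- Exactly the inputs where Python A returns: on an empty matrix or an empty first row it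
-- raises IndexError at once, and with a nonempty mantra its BFS flood reads every cell of the
-- ROW×COL box, so it raises IndexError whenever some row is shorter than row 0.
def Pre_extractMantra (matrix : List String) (mantra : String) : Prop :=
  matrix ≠ [] ∧ 0 < (matrix.headD "").toList.length ∧
    (mantra.toList.length = 0 ∨
      ∀ row ∈ matrix, (matrix.headD "").toList.length ≤ row.toList.length)
instance (matrix : List String) (mantra : String) : Decidable (Pre_extractMantra matrix mantra) := by
  unfold Pre_extractMantra; infer_instance

def pvWitness_extractMantra : List String × String := (["ab", "ba"], "ab")

def Spec_extractMantra (matrix : List String) (mantra : String) (out : Int) : Prop := out = extractMantra_alt matrix mantra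
instance (matrix : List String) (mantra : String) (out : Int) : Decidable (Spec_extractMantra matrix mantra out) := by unfold Spec_extractMantra; infer_instance

-- ===== CLAIM (what is proved, stated in full; the proofs are below) =====
def Claim_equal_extractMantra : Prop := ∀ (matrix : List String) (mantra : String), Dom_extractMantra matrix mantra → Pre_extractMantra matrix mantra → Spec_extractMantra matrix mantra (extractMantra matrix mantra)

-- ===== LEMMAS AND PROOFS =====

-- basic getD/set/dget/dset facts
theorem dget_bounds {d : List (List Nat)} {c i v : Nat} (h : v < dget d c i) :
    c < d.length ∧ i < (d.getD c []).length := by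
  constructor
  · by_contra hc
    have h0 : d.getD c [] = [] := List.getD_eq_default _ _ (by omega)
    have : dget d c i = 0 := by unfold dget; rw [h0]; simp
    omega
  · by_contra hi
    have : dget d c i = 0 := by
      unfold dget; exact List.getD_eq_default _ _ (by omega)
    omega

theorem list_getD_set_self {α : Type} (l : List α) (i : Nat) (a dflt : α) (h : i < l.length) :
    (l.set i a).getD i dflt = a := by
  rw [List.getD_eq_getElem?_getD, List.getElem?_set_self (by simpa using h)]
  rfl

theorem list_getD_set_ne {α : Type} (l : List α) (i j : Nat) (a dflt : α) (h : i ≠ j) :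
    (l.set i a).getD j dflt = l.getD j dflt := by
  rw [List.getD_eq_getElem?_getD, List.getElem?_set_ne h, ← List.getD_eq_getElem?_getD]

theorem dget_dset_self {d : List (List Nat)} {c i v : Nat} (h : v < dget d c i) :
    dget (dset d c i v) c i = v := by
  obtain ⟨hc, hi⟩ := dget_bounds h
  unfold dget dset
  rw [list_getD_set_self _ _ _ _ hc]
  exact list_getD_set_self _ _ _ _ hi

theorem dget_dset_other {d : List (List Nat)} {c i v c' i' : Nat} (h : ¬(c = c' ∧ i = i')) :
    dget (dset d c i v) c' i' = dget d c' i' := by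
  unfold dget dset
  by_cases hc : c = c'
  · subst hc
    have hii : i ≠ i' := by tauto
    by_cases hcl : c < d.length
    · rw [list_getD_set_self _ _ _ _ hcl]
      exact list_getD_set_ne _ _ _ _ _ hii
    · have h1 : (d.set c ((d.getD c []).set i v)).getD c [] = [] :=
        List.getD_eq_default _ _ (by simpa using Nat.le_of_not_lt hcl)
      have h2 : d.getD c [] = [] := List.getD_eq_default _ _ (Nat.le_of_not_lt hcl)
      rw [h1, h2]
  · rw [list_getD_set_ne _ _ _ _ _ hc]

-- shape preservation: equal lengths of the table and of every row slot
def ShapeEq (d D : List (List Nat)) : Prop :=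
  D.length = d.length ∧ ∀ c, (D.getD c []).length = (d.getD c []).length

theorem shapeEq_refl (d : List (List Nat)) : ShapeEq d d := ⟨rfl, fun _ => rfl⟩

theorem shapeEq_trans {d d' D : List (List Nat)} (h1 : ShapeEq d d') (h2 : ShapeEq d' D) :
    ShapeEq d D := ⟨h2.1.trans h1.1, fun c => (h2.2 c).trans (h1.2 c)⟩

theorem shapeEq_dset (d : List (List Nat)) (c i v : Nat) : ShapeEq d (dset d c i v) := by
  refine ⟨by simp [dset], fun c' => ?_⟩
  unfold dset
  by_cases hc : c = c'
  · subst hc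
    by_cases hcl : c < d.length
    · rw [list_getD_set_self _ _ _ _ hcl]; simp
    · rw [List.getD_eq_default _ _ (by simpa using Nat.le_of_not_lt hcl),
        List.getD_eq_default _ _ (Nat.le_of_not_lt hcl)]
  · rw [list_getD_set_ne _ _ _ _ _ hc]

-- "D differs from d only by writes of the value m into cells that were strictly larger"
def WriteP (m : Nat) (d D : List (List Nat)) : Prop :=
  ∀ c i, dget D c i = dget d c i ∨ (m < dget d c i ∧ dget D c i = m)

theorem WriteP_refl (m : Nat) (d : List (List Nat)) : WriteP m d d := fun _ _ => Or.inl rfl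

theorem WriteP_trans {m : Nat} {d d' D : List (List Nat)}
    (h1 : WriteP m d d') (h2 : WriteP m d' D) : WriteP m d D := by
  intro c i
  rcases h2 c i with h | ⟨hlt, he⟩
  · rw [h]; exact h1 c i
  · rcases h1 c i with h' | ⟨hlt', he'⟩
    · rw [h'] at hlt; exact Or.inr ⟨hlt, he⟩
    · rw [he'] at hlt; omega

theorem WriteP_dset {m : Nat} {d : List (List Nat)} {c i : Nat} (h : m < dget d c i) :
    WriteP m d (dset d c i m) := by
  intro c' i'
  by_cases hp : c = c' ∧ i = i'
  · obtain ⟨rfl, rfl⟩ := hp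
    exact Or.inr ⟨h, dget_dset_self h⟩
  · exact Or.inl (dget_dset_other hp)

theorem WriteP_le {m : Nat} {d D : List (List Nat)} (h : WriteP m d D) (c i : Nat) :
    dget D c i ≤ dget d c i := by
  rcases h c i with h' | ⟨h1, h2⟩ <;> omega

-- the grid box, its cell index, and the product-graph edges
def InBoxP (ROW COL : Nat) (x y : Int) : Prop :=
  0 ≤ x ∧ x < (ROW : Int) ∧ 0 ≤ y ∧ y < (COL : Int)

theorem pvCell_nat (COL xn yn : Nat) : pvCell COL (xn : Int) (yn : Int) = xn * COL + yn := by
  unfold pvCell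
  omega

theorem box_coords {ROW COL : Nat} {x y : Int} (h : InBoxP ROW COL x y) :
    ∃ xn yn : Nat, x = (xn : Int) ∧ y = (yn : Int) ∧ xn < ROW ∧ yn < COL := by
  obtain ⟨h1, h2, h3, h4⟩ := h
  exact ⟨x.toNat, y.toNat, by omega, by omega, by omega, by omega⟩

theorem cell_nat_inj {COL xn yn xn' yn' : Nat} (hy : yn < COL) (hy' : yn' < COL)
    (h : xn * COL + yn = xn' * COL + yn') : xn = xn' ∧ yn = yn' := by
  rcases lt_trichotomy xn xn' with hlt | heq | hlt
  · have : (xn + 1) * COL ≤ xn' * COL := Nat.mul_le_mul_right COL (by omega)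
    have : xn * COL + COL ≤ xn' * COL := by rw [Nat.succ_mul] at this; omega
    omega
  · constructor
    · exact heq
    · subst heq; omega
  · have : (xn' + 1) * COL ≤ xn * COL := Nat.mul_le_mul_right COL (by omega)
    have : xn' * COL + COL ≤ xn * COL := by rw [Nat.succ_mul] at this; omega
    omega

theorem pvCell_inj {ROW COL : Nat} {x y x' y' : Int} (h : InBoxP ROW COL x y)
    (h' : InBoxP ROW COL x' y') (he : pvCell COL x y = pvCell COL x' y') :
    x = x' ∧ y = y' := by
  obtain ⟨xn, yn, rfl, rfl, _, hy⟩ := box_coords h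
  obtain ⟨xn', yn', rfl, rfl, _, hy'⟩ := box_coords h'
  rw [pvCell_nat, pvCell_nat] at he
  obtain ⟨e1, e2⟩ := cell_nat_inj hy hy' he
  exact ⟨by rw [e1], by rw [e2]⟩

theorem pvCell_lt {ROW COL : Nat} {x y : Int} (h : InBoxP ROW COL x y) :
    pvCell COL x y < ROW * COL := by
  obtain ⟨xn, yn, rfl, rfl, hx, hy⟩ := box_coords h
  rw [pvCell_nat]
  calc xn * COL + yn < xn * COL + COL := by omega
    _ = (xn + 1) * COL := by rw [Nat.succ_mul]
    _ ≤ ROW * COL := Nat.mul_le_mul_right COL (by omega)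

-- an edge of the (layer, cell) product graph: a unit move inside a layer i < n,
-- or the extraction edge (i,x,y) → (i+1,x,y) when the cell carries mantra[i]
def EdgeTo (grid : List (List Char)) (man : List Char) (ROW COL n i : Nat) (x y : Int)
    (j : Nat) (a b : Int) : Prop :=
  InBoxP ROW COL x y ∧ InBoxP ROW COL a b ∧ i < n ∧
    ((j = i ∧ ∃ dxy ∈ pvDIR4, a = x + dxy.1 ∧ b = y + dxy.2) ∨
     (j = i + 1 ∧ a = x ∧ b = y ∧ pvChar grid x y = man.getD i ' '))

-- a table (seen through a getter f layer x y) is stable when no edge can relax it,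
-- and justified when every finite entry is the source or strictly exceeds an in-neighbour
def StableT (grid : List (List Char)) (man : List Char) (ROW COL n : Nat)
    (f : Nat → Int → Int → Nat) : Prop :=
  ∀ i x y j a b, EdgeTo grid man ROW COL n i x y j a b → f j a b ≤ f i x y + 1

def JustT (grid : List (List Char)) (man : List Char) (ROW COL n : Nat)
    (f : Nat → Int → Int → Nat) : Prop :=
  ∀ i x y, InBoxP ROW COL x y → i ≤ n → f i x y < pvINF →
    (i = 0 ∧ x = 0 ∧ y = 0) ∨
    ∃ i' x' y', EdgeTo grid man ROW COL n i' x' y' i x y ∧ f i' x' y' < f i x y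

-- a stable bounded table is below any justified table: hence two tables that are both
-- stable, justified, 0 at the source and ≤ INF agree everywhere in the box
theorem fix_le (grid : List (List Char)) (man : List Char) (ROW COL n : Nat)
    (f g : Nat → Int → Int → Nat) (hs : StableT grid man ROW COL n f)
    (hb : ∀ i x y, f i x y ≤ pvINF) (hsrc : f 0 0 0 = 0)
    (hj : JustT grid man ROW COL n g) :
    ∀ m i x y, InBoxP ROW COL x y → i ≤ n → g i x y ≤ m → f i x y ≤ g i x y := by
  intro m
  induction m with
  | zero =>
    intro i x y hbox hi hg
    by_cases hfin : g i x y < pvINF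
    · rcases hj i x y hbox hi hfin with ⟨rfl, rfl, rfl⟩ | ⟨i', x', y', _, hlt⟩
      · rw [hsrc]; omega
      · omega
    · have : pvINF ≤ g i x y := by omega
      exact le_trans (hb i x y) this
  | succ m ih =>
    intro i x y hbox hi hg
    by_cases hfin : g i x y < pvINF
    · rcases hj i x y hbox hi hfin with ⟨rfl, rfl, rfl⟩ | ⟨i', x', y', hedge, hlt⟩
      · rw [hsrc]; omega
      · have hbox' : InBoxP ROW COL x' y' := hedge.1
        have hi' : i' ≤ n := by have := hedge.2.2.1; omega
        have h1 : f i' x' y' ≤ g i' x' y' := ih i' x' y' hbox' hi' (by omega)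
        have h2 : f i x y ≤ f i' x' y' + 1 := hs i' x' y' i x y hedge
        omega
    · have : pvINF ≤ g i x y := by omega
      exact le_trans (hb i x y) this

theorem fix_eq (grid : List (List Char)) (man : List Char) (ROW COL n : Nat)
    (f g : Nat → Int → Int → Nat)
    (hsf : StableT grid man ROW COL n f) (hbf : ∀ i x y, f i x y ≤ pvINF)
    (hf0 : f 0 0 0 = 0) (hjf : JustT grid man ROW COL n f)
    (hsg : StableT grid man ROW COL n g) (hbg : ∀ i x y, g i x y ≤ pvINF)
    (hg0 : g 0 0 0 = 0) (hjg : JustT grid man ROW COL n g) :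
    ∀ i x y, InBoxP ROW COL x y → i ≤ n → f i x y = g i x y := by
  intro i x y hbox hi
  exact le_antisymm
    (fix_le grid man ROW COL n f g hsf hbf hf0 hjg (g i x y) i x y hbox hi (le_refl _))
    (fix_le grid man ROW COL n g f hsg hbg hg0 hjf (f i x y) i x y hbox hi (le_refl _))

theorem dir4_neg {dxy : Int × Int} (h : dxy ∈ pvDIR4) : (-dxy.1, -dxy.2) ∈ pvDIR4 := by
  obtain ⟨a, b⟩ := dxy
  simp only [pvDIR4, List.mem_cons, List.not_mem_nil, or_false, Prod.mk.injEq] at h ⊢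
  rcases h with ⟨rfl, rfl⟩ | ⟨rfl, rfl⟩ | ⟨rfl, rfl⟩ | ⟨rfl, rfl⟩ <;> simp

-- ===== the A side: what one processed queue entry does to the table =====
-- everything a processed pop of u = (step, i, x, y) may do: lower entries to step+1 along
-- edges out of u, and append exactly those targets (at step+1) to the queue
def PostA (grid : List (List Char)) (man : List Char) (ROW COL n step i : Nat) (x y : Int)
    (d D : List (List Nat)) (Δ : List (Nat × Nat × Int × Int)) : Prop :=
  ShapeEq d D ∧ WriteP (step + 1) d D ∧
  (∀ c j, dget D c j ≠ dget d c j →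
     ∃ a b, InBoxP ROW COL a b ∧ c = pvCell COL a b ∧
       EdgeTo grid man ROW COL n i x y j a b ∧ (step + 1, j, a, b) ∈ Δ) ∧
  (∀ e ∈ Δ, e.1 = step + 1 ∧ e.2.1 ≤ n ∧ InBoxP ROW COL e.2.2.1 e.2.2.2 ∧
     dget D (pvCell COL e.2.2.1 e.2.2.2) e.2.1 ≤ step + 1)

theorem postA_refl (grid : List (List Char)) (man : List Char) (ROW COL n step i : Nat)
    (x y : Int) (d : List (List Nat)) : PostA grid man ROW COL n step i x y d d [] :=
  ⟨shapeEq_refl d, WriteP_refl _ d, fun c j h => absurd rfl h, fun e he => absurd he (by simp)⟩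

theorem postA_comp {grid : List (List Char)} {man : List Char} {ROW COL n step i : Nat}
    {x y : Int} {d D1 D : List (List Nat)} {Δ1 Δ2 : List (Nat × Nat × Int × Int)}
    (h1 : PostA grid man ROW COL n step i x y d D1 Δ1)
    (h2 : PostA grid man ROW COL n step i x y D1 D Δ2) :
    PostA grid man ROW COL n step i x y d D (Δ1 ++ Δ2) := by
  obtain ⟨s1, w1, c1, q1⟩ := h1
  obtain ⟨s2, w2, c2, q2⟩ := h2
  refine ⟨shapeEq_trans s1 s2, WriteP_trans w1 w2, ?_, ?_⟩
  · intro c j hne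
    by_cases hmid : dget D c j = dget D1 c j
    · obtain ⟨a, b, hab, hc, he, hm⟩ := c1 c j (by rw [← hmid]; exact hne)
      exact ⟨a, b, hab, hc, he, List.mem_append_left _ hm⟩
    · obtain ⟨a, b, hab, hc, he, hm⟩ := c2 c j hmid
      exact ⟨a, b, hab, hc, he, List.mem_append_right _ hm⟩
  · intro e he
    rcases List.mem_append.mp he with hm | hm
    · obtain ⟨p1, p2, p3, p4⟩ := q1 e hm
      exact ⟨p1, p2, p3, le_trans (WriteP_le w2 _ _) p4⟩
    · exact q2 e hm

-- one conditional write of step+1 at an edge target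
theorem postA_write {grid : List (List Char)} {man : List Char} {ROW COL n step i j : Nat}
    {x y a b : Int} {d : List (List Nat)} (hj : j ≤ n) (htgt : InBoxP ROW COL a b)
    (hedge : EdgeTo grid man ROW COL n i x y j a b)
    (hlt : step + 1 < dget d (pvCell COL a b) j) :
    PostA grid man ROW COL n step i x y d (dset d (pvCell COL a b) j (step + 1))
      [(step + 1, j, a, b)] := by
  refine ⟨shapeEq_dset d _ j _, WriteP_dset hlt, ?_, ?_⟩
  · intro c j' hne
    have hcj : pvCell COL a b = c ∧ j = j' := by
      by_contra hcon
      exact hne (dget_dset_other hcon)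
    obtain ⟨rfl, rfl⟩ := hcj
    exact ⟨a, b, htgt, rfl, hedge, by simp⟩
  · intro e he
    simp only [List.mem_singleton] at he
    subst he
    exact ⟨rfl, hj, htgt, le_of_eq (dget_dset_self hlt)⟩

theorem extA_post (grid : List (List Char)) (man : List Char) (ROW COL n step i : Nat)
    (x y : Int) (hbox : InBoxP ROW COL x y) (hi : i < n)
    (d : List (List Nat)) (qa : List (Nat × Nat × Int × Int)) :
    ∃ D Δ, pvExtA grid man COL step i x y (d, qa) = (D, qa ++ Δ) ∧
      PostA grid man ROW COL n step i x y d D Δ ∧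
      (pvChar grid x y = man.getD i ' ' → dget D (pvCell COL x y) (i + 1) ≤ step + 1) := by
  unfold pvExtA
  split
  · rename_i h
    obtain ⟨hchar, hlt⟩ := h
    refine ⟨_, [(step + 1, i + 1, x, y)], rfl, ?_, ?_⟩
    · exact postA_write (by omega) hbox
        ⟨hbox, hbox, hi, Or.inr ⟨rfl, rfl, rfl, hchar⟩⟩ hlt
    · intro _
      exact le_of_eq (dget_dset_self hlt)
  · rename_i h
    refine ⟨d, [], by simp, postA_refl grid man ROW COL n step i x y d, ?_⟩
    intro hchar
    by_cases hlt : step + 1 < dget d (pvCell COL x y) (i + 1)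
    · exact absurd ⟨hchar, hlt⟩ h
    · omega

theorem moveA_post (grid : List (List Char)) (man : List Char) (ROW COL n step i : Nat)
    (x y : Int) (hbox : InBoxP ROW COL x y) (hi : i < n) :
    ∀ (dirs : List (Int × Int)), (∀ dxy ∈ dirs, dxy ∈ pvDIR4) →
    ∀ (d : List (List Nat)) (qa : List (Nat × Nat × Int × Int)),
    ∃ D Δ, List.foldl (pvMoveA ROW COL step i x y) (d, qa) dirs = (D, qa ++ Δ) ∧
      PostA grid man ROW COL n step i x y d D Δ ∧
      (∀ dxy ∈ dirs, InBoxP ROW COL (x + dxy.1) (y + dxy.2) →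
        dget D (pvCell COL (x + dxy.1) (y + dxy.2)) i ≤ step + 1) := by
  intro dirs
  induction dirs with
  | nil =>
    intro _ d qa
    exact ⟨d, [], by simp, postA_refl grid man ROW COL n step i x y d, by simp⟩
  | cons dxy dirs ih =>
    intro hsub d qa
    simp only [List.foldl_cons]
    have hmem : dxy ∈ pvDIR4 := hsub dxy (by simp)
    by_cases hC : 0 ≤ x + dxy.1 ∧ x + dxy.1 < (ROW : Int) ∧ 0 ≤ y + dxy.2 ∧ y + dxy.2 < (COL : Int) ∧
        step + 1 < dget d (pvCell COL (x + dxy.1) (y + dxy.2)) i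
    · have hst : pvMoveA ROW COL step i x y (d, qa) dxy =
          (dset d (pvCell COL (x + dxy.1) (y + dxy.2)) i (step + 1),
            qa ++ [(step + 1, i, x + dxy.1, y + dxy.2)]) := by
        simp only [pvMoveA]; rw [if_pos hC]
      rw [hst]
      obtain ⟨D, Δ2, heq, hpost, hrel⟩ := ih (fun d' hd' => hsub d' (by simp [hd'])) _ _
      have htgt : InBoxP ROW COL (x + dxy.1) (y + dxy.2) := ⟨hC.1, hC.2.1, hC.2.2.1, hC.2.2.2.1⟩
      have hedge1 : EdgeTo grid man ROW COL n i x y i (x + dxy.1) (y + dxy.2) :=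
        ⟨hbox, htgt, hi, Or.inl ⟨rfl, dxy, hmem, rfl, rfl⟩⟩
      have hpost1 := postA_write (le_of_lt hi) htgt hedge1 hC.2.2.2.2
      refine ⟨D, (step + 1, i, x + dxy.1, y + dxy.2) :: Δ2, by rw [heq]; simp, ?_, ?_⟩
      · have := postA_comp hpost1 hpost
        simpa using this
      · intro dxy' hd' hb'
        rcases List.mem_cons.mp hd' with rfl | hd''
        · calc dget D (pvCell COL (x + dxy'.1) (y + dxy'.2)) i
              ≤ dget (dset d (pvCell COL (x + dxy'.1) (y + dxy'.2)) i (step + 1))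
                  (pvCell COL (x + dxy'.1) (y + dxy'.2)) i := WriteP_le hpost.2.1 _ _
            _ = step + 1 := dget_dset_self hC.2.2.2.2
        · exact hrel dxy' hd'' hb'
    · have hst : pvMoveA ROW COL step i x y (d, qa) dxy = (d, qa) := by
        simp only [pvMoveA]; rw [if_neg hC]
      rw [hst]
      obtain ⟨D, Δ2, heq, hpost, hrel⟩ := ih (fun d' hd' => hsub d' (by simp [hd'])) d qa
      refine ⟨D, Δ2, heq, hpost, ?_⟩
      intro dxy' hd' hb'
      rcases List.mem_cons.mp hd' with rfl | hd''
      · have hnlt : ¬ (step + 1 < dget d (pvCell COL (x + dxy'.1) (y + dxy'.2)) i) := by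
          intro hlt
          exact hC ⟨hb'.1, hb'.2.1, hb'.2.2.1, hb'.2.2.2, hlt⟩
        exact le_trans (WriteP_le hpost.2.1 _ _) (by omega)
      · exact hrel dxy' hd'' hb'

theorem stepA_process (grid : List (List Char)) (man : List Char) (ROW COL n step i : Nat)
    (x y : Int) (hbox : InBoxP ROW COL x y) (hi : i < n)
    (d : List (List Nat)) (rest : List (Nat × Nat × Int × Int))
    (hq : dget d (pvCell COL x y) i = step) :
    ∃ D Δ, pvStepA grid man ROW COL n (d, rest) (step, i, x, y) = (D, rest ++ Δ) ∧
      PostA grid man ROW COL n step i x y d D Δ ∧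
      (∀ j a b, EdgeTo grid man ROW COL n i x y j a b → dget D (pvCell COL a b) j ≤ step + 1) ∧
      dget D (pvCell COL x y) i = step := by
  obtain ⟨D1, Δ1, he1, hp1, hrel1⟩ := extA_post grid man ROW COL n step i x y hbox hi d rest
  obtain ⟨D, Δ2, he2, hp2, hrel2⟩ := moveA_post grid man ROW COL n step i x y hbox hi
    pvDIR4 (fun _ h => h) D1 (rest ++ Δ1)
  have hpost := postA_comp hp1 hp2
  have hu : dget D (pvCell COL x y) i = step := by
    rcases hpost.2.1 (pvCell COL x y) i with h | ⟨h1, _⟩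
    · rw [h, hq]
    · rw [hq] at h1; omega
  refine ⟨D, Δ1 ++ Δ2, ?_, hpost, ?_, hu⟩
  · simp only [pvStepA]
    rw [if_neg (show ¬((step, i, x, y).2.1 = n) by simp only []; omega),
      if_neg (show ¬(dget d (pvCell COL (step, i, x, y).2.2.1 (step, i, x, y).2.2.2)
        (step, i, x, y).2.1 < (step, i, x, y).1) by simp only []; omega)]
    rw [he1, he2, List.append_assoc]
  · intro j a b hedge
    rcases hedge.2.2.2 with ⟨rfl, dxy, hm, rfl, rfl⟩ | ⟨rfl, rfl, rfl, hchar⟩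
    · exact hrel2 dxy hm hedge.2.1
    · exact le_trans (WriteP_le hp2.2.1 _ _) (hrel1 hchar)

-- ===== the A-side loop invariant =====
def InvA (grid : List (List Char)) (man : List Char) (ROW COL n : Nat)
    (d : List (List Nat)) (q : List (Nat × Nat × Int × Int)) : Prop :=
  d.length = ROW * COL ∧ (∀ c, c < ROW * COL → (d.getD c []).length = n + 1) ∧
  (∀ c j, dget d c j ≤ pvINF) ∧ dget d 0 0 = 0 ∧
  JustT grid man ROW COL n (fun i x y => dget d (pvCell COL x y) i) ∧
  (∀ e ∈ q, InBoxP ROW COL e.2.2.1 e.2.2.2 ∧ e.2.1 ≤ n ∧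
    dget d (pvCell COL e.2.2.1 e.2.2.2) e.2.1 ≤ e.1) ∧
  (∀ i x y, InBoxP ROW COL x y → i < n →
    (∀ j a b, EdgeTo grid man ROW COL n i x y j a b →
      dget d (pvCell COL a b) j ≤ dget d (pvCell COL x y) i + 1) ∨
    (dget d (pvCell COL x y) i, i, x, y) ∈ q)

theorem stepA_preserves {grid : List (List Char)} {man : List Char} {ROW COL n : Nat}
    {d : List (List Nat)} {q : List (Nat × Nat × Int × Int)} {e : Nat × Nat × Int × Int}
    (hinv : InvA grid man ROW COL n d (e :: q)) :
    InvA grid man ROW COL n (pvStepA grid man ROW COL n (d, q) e).1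
      (pvStepA grid man ROW COL n (d, q) e).2 := by
  obtain ⟨hlen, hrow, hbnd, hsrc, hjust, hqok, hstab⟩ := hinv
  obtain ⟨step, i, x, y⟩ := e
  obtain ⟨hbox, hile, hfle⟩ := hqok (step, i, x, y) (by simp)
  simp only at hbox hile hfle
  by_cases hn : i = n
  · have hst : pvStepA grid man ROW COL n (d, q) (step, i, x, y) = (d, q) := by
      simp only [pvStepA]; rw [if_pos (by simpa using hn)]
    rw [hst]
    refine ⟨hlen, hrow, hbnd, hsrc, hjust, fun e' he' => hqok e' (by simp [he']), ?_⟩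
    intro i' x' y' hbox' hi'
    rcases hstab i' x' y' hbox' hi' with hrel | hmem
    · exact Or.inl hrel
    · rcases List.mem_cons.mp hmem with heq | hmem'
      · exfalso
        have : i' = i := congrArg (fun t => t.2.1) heq
        omega
      · exact Or.inr hmem'
  by_cases hstale : dget d (pvCell COL x y) i < step
  · have hst : pvStepA grid man ROW COL n (d, q) (step, i, x, y) = (d, q) := by
      simp only [pvStepA]
      rw [if_neg (by simpa using hn), if_pos (by simpa using hstale)]
    rw [hst]
    refine ⟨hlen, hrow, hbnd, hsrc, hjust, fun e' he' => hqok e' (by simp [he']), ?_⟩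
    intro i' x' y' hbox' hi'
    rcases hstab i' x' y' hbox' hi' with hrel | hmem
    · exact Or.inl hrel
    · rcases List.mem_cons.mp hmem with heq | hmem'
      · exfalso
        have h1 : dget d (pvCell COL x' y') i' = step := congrArg (fun t => t.1) heq
        have h2 : i' = i := congrArg (fun t => t.2.1) heq
        have h3 : x' = x := congrArg (fun t => t.2.2.1) heq
        have h4 : y' = y := congrArg (fun t => t.2.2.2) heq
        rw [h2, h3, h4] at h1
        omega
      · exact Or.inr hmem'
  · have hi : i < n := by omega
    have hq : dget d (pvCell COL x y) i = step := by omega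
    obtain ⟨D, Δ, heq, ⟨hshape, hwrite, hchg, hΔ⟩, hrel, hu⟩ :=
      stepA_process grid man ROW COL n step i x y hbox hi d q hq
    rw [heq]
    dsimp only
    refine ⟨hshape.1.trans hlen, fun c hc => (hshape.2 c).trans (hrow c hc), ?_, ?_, ?_, ?_, ?_⟩
    · intro c j
      rcases hwrite c j with h | ⟨h1, _⟩
      · rw [h]; exact hbnd c j
      · have := hbnd c j
        omega
    · rcases hwrite 0 0 with h | ⟨h1, _⟩
      · rw [h]; exact hsrc
      · rw [hsrc] at h1; omega
    · intro i' x' y' hbox' hi' hfin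
      by_cases hch : dget D (pvCell COL x' y') i' = dget d (pvCell COL x' y') i'
      · simp only [hch] at hfin ⊢
        rcases hjust i' x' y' hbox' hi' hfin with hsrc' | ⟨i'', x'', y'', hedge, hlt⟩
        · exact Or.inl hsrc'
        · exact Or.inr ⟨i'', x'', y'', hedge, by
            calc dget D (pvCell COL x'' y'') i'' ≤ dget d (pvCell COL x'' y'') i'' :=
              WriteP_le hwrite _ _
            _ < dget d (pvCell COL x' y') i' := hlt⟩
      · obtain ⟨a, b, hab, hcell, hedge, _⟩ := hchg _ _ hch
        obtain ⟨rfl, rfl⟩ := pvCell_inj hbox' hab hcell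
        refine Or.inr ⟨i, x, y, hedge, ?_⟩
        show dget D (pvCell COL x y) i < dget D (pvCell COL x' y') i'
        rcases hwrite (pvCell COL x' y') i' with h | ⟨_, h2⟩
        · exact absurd h hch
        · rw [h2, hu]; omega
    · intro e' he'
      rcases List.mem_append.mp he' with hm | hm
      · obtain ⟨p1, p2, p3⟩ := hqok e' (by simp [hm])
        exact ⟨p1, p2, le_trans (WriteP_le hwrite _ _) p3⟩
      · obtain ⟨p1, p2, p3, p4⟩ := hΔ e' hm
        exact ⟨p3, p2, by rw [p1]; exact p4⟩
    · intro i' x' y' hbox' hi'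
      by_cases huu : i' = i ∧ x' = x ∧ y' = y
      · obtain ⟨rfl, rfl, rfl⟩ := huu
        refine Or.inl (fun j a b hedge => ?_)
        rw [hu]
        exact hrel j a b hedge
      · have hch_route : dget D (pvCell COL x' y') i' ≠ dget d (pvCell COL x' y') i' →
            (dget D (pvCell COL x' y') i', i', x', y') ∈ q ++ Δ := by
          intro hch
          obtain ⟨a, b, hab, hcell, _, hmem⟩ := hchg _ _ hch
          obtain ⟨rfl, rfl⟩ := pvCell_inj hbox' hab hcell
          rcases hwrite (pvCell COL x' y') i' with h | ⟨_, h2⟩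
          · exact absurd h hch
          · rw [h2]; exact List.mem_append_right _ hmem
        rcases hstab i' x' y' hbox' hi' with hrelo | hmemo
        · by_cases hch : dget D (pvCell COL x' y') i' = dget d (pvCell COL x' y') i'
          · refine Or.inl (fun j a b hedge => ?_)
            rw [hch]
            exact le_trans (WriteP_le hwrite _ _) (hrelo j a b hedge)
          · exact Or.inr (hch_route hch)
        · rcases List.mem_cons.mp hmemo with heqo | hmemo'
          · exfalso
            apply huu
            exact ⟨congrArg (fun t => t.2.1) heqo, congrArg (fun t => t.2.2.1) heqo,
              congrArg (fun t => t.2.2.2) heqo⟩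
          · by_cases hch : dget D (pvCell COL x' y') i' = dget d (pvCell COL x' y') i'
            · rw [hch]
              exact Or.inr (List.mem_append_left _ hmemo')
            · exact Or.inr (hch_route hch)

theorem loopA_res (grid : List (List Char)) (man : List Char) (ROW COL n : Nat) :
    ∀ (d : List (List Nat)) (q : List (Nat × Nat × Int × Int)),
    InvA grid man ROW COL n d q →
    InvA grid man ROW COL n (pvLoopA grid man ROW COL n d q) [] := by
  intro d q
  induction d, q using pvLoopA.induct grid man ROW COL n with
  | case1 d => intro h; rw [pvLoopA]; exact h
  | case2 d e rest st ih =>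
    intro h
    rw [pvLoopA]
    exact ih (stepA_preserves h)

theorem invA_nil_stable {grid : List (List Char)} {man : List Char} {ROW COL n : Nat}
    {d : List (List Nat)} (h : InvA grid man ROW COL n d []) :
    StableT grid man ROW COL n (fun i x y => dget d (pvCell COL x y) i) := by
  intro i x y j a b hedge
  rcases h.2.2.2.2.2.2 i x y hedge.1 hedge.2.2.1 with hrel | hmem
  · exact hrel j a b hedge
  · exact absurd hmem (by simp)

-- ===== the B side: the sweep preserves the invariant and a fixpoint is stable =====
theorem dget_dset_le {d : List (List Nat)} {c i v : Nat} (h : v < dget d c i) (c' i' : Nat) :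
    dget (dset d c i v) c' i' ≤ dget d c' i' := WriteP_le (WriteP_dset h) c' i'

theorem dir4_ne_zero {dxy : Int × Int} (h : dxy ∈ pvDIR4) : ¬(dxy.1 = 0 ∧ dxy.2 = 0) := by
  obtain ⟨a, b⟩ := dxy
  simp only [pvDIR4, List.mem_cons, List.not_mem_nil, or_false, Prod.mk.injEq] at h
  rcases h with ⟨rfl, rfl⟩ | ⟨rfl, rfl⟩ | ⟨rfl, rfl⟩ | ⟨rfl, rfl⟩ <;> simp

def InvB (grid : List (List Char)) (man : List Char) (ROW COL n : Nat)
    (d : List (List Nat)) : Prop :=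
  d.length = n + 1 ∧ (∀ j, j < n + 1 → (d.getD j []).length = ROW * COL) ∧
  (∀ j c, dget d j c ≤ pvINF) ∧ dget d 0 0 = 0 ∧
  JustT grid man ROW COL n (fun i x y => dget d i (pvCell COL x y))

theorem invB_write {grid : List (List Char)} {man : List Char} {ROW COL n i j : Nat}
    {x y a b : Int} {d : List (List Nat)} {w : Nat}
    (hbox : InBoxP ROW COL x y) (hin : i ≤ n)
    (hedge : EdgeTo grid man ROW COL n j a b i x y)
    (hjv : dget d j (pvCell COL a b) = w)
    (hlt : w + 1 < dget d i (pvCell COL x y))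
    (hne : ¬(i = j ∧ pvCell COL x y = pvCell COL a b))
    (hinv : InvB grid man ROW COL n d) :
    InvB grid man ROW COL n (dset d i (pvCell COL x y) (w + 1)) := by
  obtain ⟨hlen, hrows, hbnd, hsrc, hjust⟩ := hinv
  have hsh := shapeEq_dset d i (pvCell COL x y) (w + 1)
  refine ⟨hsh.1.trans hlen, fun c hc => (hsh.2 c).trans (hrows c hc), ?_, ?_, ?_⟩
  · intro j' c'
    by_cases hc : i = j' ∧ pvCell COL x y = c'
    · obtain ⟨rfl, rfl⟩ := hc
      rw [dget_dset_self hlt]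
      have := hbnd i (pvCell COL x y)
      omega
    · rw [dget_dset_other hc]
      exact hbnd j' c'
  · by_cases hc : i = 0 ∧ pvCell COL x y = 0
    · obtain ⟨rfl, hc0⟩ := hc
      rw [hc0, hsrc] at hlt
      exact absurd hlt (by omega)
    · rw [dget_dset_other hc]
      exact hsrc
  · intro i' x' y' hbox' hi' hfin
    by_cases hc : i = i' ∧ pvCell COL x y = pvCell COL x' y'
    · obtain ⟨rfl, hcell⟩ := hc
      obtain ⟨rfl, rfl⟩ := pvCell_inj hbox hbox' hcell
      refine Or.inr ⟨j, a, b, hedge, ?_⟩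
      show dget (dset d i (pvCell COL x y) (w + 1)) j (pvCell COL a b) <
        dget (dset d i (pvCell COL x y) (w + 1)) i (pvCell COL x y)
      rw [dget_dset_self hlt, dget_dset_other hne, hjv]
      omega
    · have hunch : dget (dset d i (pvCell COL x y) (w + 1)) i' (pvCell COL x' y') =
          dget d i' (pvCell COL x' y') := dget_dset_other hc
      simp only [hunch] at hfin ⊢
      rcases hjust i' x' y' hbox' hi' hfin with hs | ⟨i'', x'', y'', he'', hlt''⟩
      · exact Or.inl hs
      · exact Or.inr ⟨i'', x'', y'', he'', lt_of_le_of_lt (dget_dset_le hlt _ _) hlt''⟩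

theorem relaxExtB_inv {grid : List (List Char)} {man : List Char} {ROW COL n i : Nat}
    {x y : Int} {st : List (List Nat) × Bool}
    (hbox : InBoxP ROW COL x y) (hin : i ≤ n)
    (hinv : InvB grid man ROW COL n st.1) :
    InvB grid man ROW COL n (pvRelaxExtB grid man COL i x y st).1 := by
  unfold pvRelaxExtB
  split
  · rename_i h
    obtain ⟨hpos, hchar, hlt⟩ := h
    have hedge : EdgeTo grid man ROW COL n (i - 1) x y i x y :=
      ⟨hbox, hbox, by omega, Or.inr ⟨by omega, rfl, rfl, hchar⟩⟩
    exact invB_write hbox hin hedge rfl hlt (by rintro ⟨h', -⟩; omega) hinv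
  · exact hinv

theorem relaxMoveB_inv {grid : List (List Char)} {man : List Char} {ROW COL n i : Nat}
    {x y : Int} {st : List (List Nat) × Bool} {dxy : Int × Int}
    (hbox : InBoxP ROW COL x y) (hin : i < n) (hmem : dxy ∈ pvDIR4)
    (hinv : InvB grid man ROW COL n st.1) :
    InvB grid man ROW COL n (pvRelaxMoveB ROW COL i x y st dxy).1 := by
  unfold pvRelaxMoveB
  split
  · rename_i h
    obtain ⟨h1, h2, h3, h4, hlt⟩ := h
    have hnb : InBoxP ROW COL (x + dxy.1) (y + dxy.2) := ⟨h1, h2, h3, h4⟩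
    have hedge : EdgeTo grid man ROW COL n i (x + dxy.1) (y + dxy.2) i x y := by
      refine ⟨hnb, hbox, hin, Or.inl ⟨rfl, (-dxy.1, -dxy.2), dir4_neg hmem, by omega, by omega⟩⟩
    have hne : ¬(i = i ∧ pvCell COL x y = pvCell COL (x + dxy.1) (y + dxy.2)) := by
      rintro ⟨-, hcell⟩
      obtain ⟨hx, hy⟩ := pvCell_inj hbox hnb hcell
      exact dir4_ne_zero hmem ⟨by omega, by omega⟩
    exact invB_write hbox (le_of_lt hin) hedge rfl hlt hne hinv
  · exact hinv

theorem visitB_inv {grid : List (List Char)} {man : List Char} {ROW COL n i : Nat}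
    {x y : Int} {st : List (List Nat) × Bool}
    (hbox : InBoxP ROW COL x y) (hin : i ≤ n)
    (hinv : InvB grid man ROW COL n st.1) :
    InvB grid man ROW COL n (pvVisitB grid man ROW COL n i x y st).1 := by
  unfold pvVisitB
  have h1 := relaxExtB_inv hbox hin hinv
  split
  · rename_i hlt
    exact foldl_pres (fun (s : List (List Nat) × Bool) => InvB grid man ROW COL n s.1) _ _
      (fun s a ha hs => relaxMoveB_inv hbox hlt ha hs) _ h1
  · exact h1

theorem sweepB_inv {grid : List (List Char)} {man : List Char} {ROW COL n : Nat}
    {d : List (List Nat)} (hinv : InvB grid man ROW COL n d) :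
    InvB grid man ROW COL n (pvSweepB grid man ROW COL n d).1 := by
  unfold pvSweepB
  refine foldl_pres (fun (s : List (List Nat) × Bool) => InvB grid man ROW COL n s.1) _ _ (fun s i hi hs => ?_) _ hinv
  rw [List.mem_range] at hi
  refine foldl_pres (fun (s : List (List Nat) × Bool) => InvB grid man ROW COL n s.1) _ _ (fun s x hx hs => ?_) _ hs
  rw [List.mem_range] at hx
  refine foldl_pres (fun (s : List (List Nat) × Bool) => InvB grid man ROW COL n s.1) _ _ (fun s y hy hs => ?_) _ hs
  rw [List.mem_range] at hy
  exact visitB_inv ⟨by omega, by exact_mod_cast Nat.cast_lt.mpr hx, by omega,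
    by exact_mod_cast Nat.cast_lt.mpr hy⟩ (by omega) hs

-- flag monotonicity and the no-change extraction
theorem relaxExtB_mono {grid : List (List Char)} {man : List Char} {COL i : Nat}
    {x y : Int} {st : List (List Nat) × Bool} (h : st.2 = true) :
    (pvRelaxExtB grid man COL i x y st).2 = true := by
  unfold pvRelaxExtB; split <;> simp [h]

theorem relaxMoveB_mono {ROW COL i : Nat} {x y : Int} {st : List (List Nat) × Bool}
    {dxy : Int × Int} (h : st.2 = true) :
    (pvRelaxMoveB ROW COL i x y st dxy).2 = true := by
  unfold pvRelaxMoveB; split <;> simp [h]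

theorem visitB_mono {grid : List (List Char)} {man : List Char} {ROW COL n i : Nat}
    {x y : Int} {st : List (List Nat) × Bool} (h : st.2 = true) :
    (pvVisitB grid man ROW COL n i x y st).2 = true := by
  unfold pvVisitB
  have h1 := relaxExtB_mono (grid := grid) (man := man) (COL := COL) (i := i) (x := x) (y := y)
    (st := st) h
  split
  · exact foldl_pres (fun (s : List (List Nat) × Bool) => s.2 = true) _ _ (fun s a _ hs => relaxMoveB_mono hs) _ h1
  · exact h1

theorem relaxExtB_io {grid : List (List Char)} {man : List Char} {COL i : Nat}
    {x y : Int} (st : List (List Nat) × Bool) :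
    pvRelaxExtB grid man COL i x y st = st ∨ (pvRelaxExtB grid man COL i x y st).2 = true := by
  unfold pvRelaxExtB; split
  · exact Or.inr rfl
  · exact Or.inl rfl

theorem relaxMoveB_io {ROW COL i : Nat} {x y : Int} (st : List (List Nat) × Bool)
    (dxy : Int × Int) :
    pvRelaxMoveB ROW COL i x y st dxy = st ∨ (pvRelaxMoveB ROW COL i x y st dxy).2 = true := by
  unfold pvRelaxMoveB; split
  · exact Or.inr rfl
  · exact Or.inl rfl

theorem foldl_io {α : Type} (f : (List (List Nat) × Bool) → α → (List (List Nat) × Bool))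
    (l : List α) (hm : ∀ s a, a ∈ l → s.2 = true → (f s a).2 = true)
    (hio : ∀ s a, a ∈ l → f s a = s ∨ (f s a).2 = true) :
    ∀ s, List.foldl f s l = s ∨ (List.foldl f s l).2 = true := by
  induction l with
  | nil => intro s; exact Or.inl rfl
  | cons a t ih =>
    intro s
    simp only [List.foldl_cons]
    rcases hio s a (by simp) with he | ht
    · rw [he]
      exact ih (fun s' a' ha' => hm s' a' (by simp [ha'])) (fun s' a' ha' => hio s' a' (by simp [ha'])) s
    · exact Or.inr (foldl_pres (fun (s : List (List Nat) × Bool) => s.2 = true) _ _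
        (fun s' a' ha' => hm s' a' (by simp [ha'])) _ ht)

theorem visitB_io {grid : List (List Char)} {man : List Char} {ROW COL n i : Nat}
    {x y : Int} (st : List (List Nat) × Bool) :
    pvVisitB grid man ROW COL n i x y st = st ∨ (pvVisitB grid man ROW COL n i x y st).2 = true := by
  unfold pvVisitB
  rcases relaxExtB_io (grid := grid) (man := man) (COL := COL) (i := i) (x := x) (y := y) st with
    he | ht
  · rw [he]
    split
    · exact foldl_io _ _ (fun s a _ hs => relaxMoveB_mono hs) (fun s a _ => relaxMoveB_io s a) st
    · exact Or.inl rfl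
  · split
    · exact Or.inr (foldl_pres (fun (s : List (List Nat) × Bool) => s.2 = true) _ _ (fun s a _ hs => relaxMoveB_mono hs) _ ht)
    · exact Or.inr ht

theorem foldl_fix {α : Type} (f : (List (List Nat) × Bool) → α → (List (List Nat) × Bool))
    (l : List α) (hm : ∀ s a, a ∈ l → s.2 = true → (f s a).2 = true)
    (hio : ∀ s a, a ∈ l → f s a = s ∨ (f s a).2 = true) (d : List (List Nat))
    (h : (List.foldl f (d, false) l).2 = false) :
    List.foldl f (d, false) l = (d, false) ∧ ∀ a ∈ l, f (d, false) a = (d, false) := by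
  induction l with
  | nil => exact ⟨rfl, by simp⟩
  | cons a t ih =>
    simp only [List.foldl_cons] at h ⊢
    rcases hio (d, false) a (by simp) with he | ht
    · rw [he] at h ⊢
      obtain ⟨h1, h2⟩ := ih (fun s' a' ha' => hm s' a' (by simp [ha']))
        (fun s' a' ha' => hio s' a' (by simp [ha'])) h
      refine ⟨h1, fun a' ha' => ?_⟩
      rcases List.mem_cons.mp ha' with rfl | ha''
      · exact he
      · exact h2 a' ha''
    · exfalso
      have h2 : (List.foldl f (f (d, false) a) t).2 = true :=
        foldl_pres (fun (s : List (List Nat) × Bool) => s.2 = true) f t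
          (fun s' a' ha' => hm s' a' (by simp [ha'])) _ ht
      rw [h] at h2
      exact Bool.false_ne_true h2

theorem visitB_fix {grid : List (List Char)} {man : List Char} {ROW COL n i : Nat}
    {x y : Int} {d : List (List Nat)}
    (h : pvVisitB grid man ROW COL n i x y (d, false) = (d, false)) :
    (¬(0 < i ∧ pvChar grid x y = man.getD (i - 1) ' ' ∧
        dget d (i - 1) (pvCell COL x y) + 1 < dget d i (pvCell COL x y))) ∧
    (i < n → ∀ dxy ∈ pvDIR4,
      ¬(0 ≤ x + dxy.1 ∧ x + dxy.1 < (ROW : Int) ∧ 0 ≤ y + dxy.2 ∧ y + dxy.2 < (COL : Int) ∧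
        dget d i (pvCell COL (x + dxy.1) (y + dxy.2)) + 1 < dget d i (pvCell COL x y))) := by
  have hcond : ¬(0 < i ∧ pvChar grid x y = man.getD (i - 1) ' ' ∧
      dget d (i - 1) (pvCell COL x y) + 1 < dget d i (pvCell COL x y)) := by
    intro hc
    have hext : pvRelaxExtB grid man COL i x y (d, false) =
        (dset d i (pvCell COL x y) (dget d (i - 1) (pvCell COL x y) + 1), true) := by
      unfold pvRelaxExtB; rw [if_pos hc]
    have h2 : (pvVisitB grid man ROW COL n i x y (d, false)).2 = true := by
      unfold pvVisitB
      rw [hext]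
      split
      · exact foldl_pres (fun (s : List (List Nat) × Bool) => s.2 = true) _ _
          (fun s a _ hs => relaxMoveB_mono hs) _ rfl
      · rfl
    rw [h] at h2
    exact Bool.false_ne_true h2
  have hext : pvRelaxExtB grid man COL i x y (d, false) = (d, false) := by
    unfold pvRelaxExtB; rw [if_neg hcond]
  refine ⟨hcond, fun hin dxy hmem hc => ?_⟩
  have hmove : pvRelaxMoveB ROW COL i x y (d, false) dxy =
      (dset d i (pvCell COL x y) (dget d i (pvCell COL (x + dxy.1) (y + dxy.2)) + 1), true) := by
    unfold pvRelaxMoveB; rw [if_pos hc]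
  have hfold : List.foldl (pvRelaxMoveB ROW COL i x y) (d, false) pvDIR4 = (d, false) := by
    have := h
    unfold pvVisitB at this
    rw [hext, if_pos hin] at this
    exact this
  obtain ⟨-, hper⟩ := foldl_fix (pvRelaxMoveB ROW COL i x y) pvDIR4
    (fun s a _ hs => relaxMoveB_mono hs) (fun s a _ => relaxMoveB_io s a) d (by rw [hfold])
  have := hper dxy hmem
  rw [hmove] at this
  have h2 : true = false := congrArg Prod.snd this
  exact Bool.noConfusion h2

theorem sweepB_fix {grid : List (List Char)} {man : List Char} {ROW COL n : Nat}
    {d : List (List Nat)} (h : (pvSweepB grid man ROW COL n d).2 = false) :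
    (pvSweepB grid man ROW COL n d).1 = d ∧
    ∀ i, i < n + 1 → ∀ x, x < ROW → ∀ y, y < COL →
      pvVisitB grid man ROW COL n i (x : Int) (y : Int) (d, false) = (d, false) := by
  have hmY : ∀ (i x : Nat) (s : List (List Nat) × Bool), s.2 = true →
      (List.foldl (fun st (y : Nat) => pvVisitB grid man ROW COL n i (x : Int) (y : Int) st)
        s (List.range COL)).2 = true := fun i x s hs =>
    foldl_pres (fun (s : List (List Nat) × Bool) => s.2 = true) _ _
      (fun s' y _ hs' => visitB_mono hs') s hs
  have hioY : ∀ (i x : Nat) (s : List (List Nat) × Bool),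
      List.foldl (fun st (y : Nat) => pvVisitB grid man ROW COL n i (x : Int) (y : Int) st)
        s (List.range COL) = s ∨
      (List.foldl (fun st (y : Nat) => pvVisitB grid man ROW COL n i (x : Int) (y : Int) st)
        s (List.range COL)).2 = true := fun i x s =>
    foldl_io _ _ (fun s' a _ hs => visitB_mono hs) (fun s' a _ => visitB_io s') s
  have hmX : ∀ (i : Nat) (s : List (List Nat) × Bool), s.2 = true →
      (List.foldl (fun st (x : Nat) =>
        List.foldl (fun st (y : Nat) => pvVisitB grid man ROW COL n i (x : Int) (y : Int) st)
          st (List.range COL)) s (List.range ROW)).2 = true := fun i s hs =>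
    foldl_pres (fun (s : List (List Nat) × Bool) => s.2 = true) _ _
      (fun s' x _ hs' => hmY i x s' hs') s hs
  have hioX : ∀ (i : Nat) (s : List (List Nat) × Bool),
      List.foldl (fun st (x : Nat) =>
        List.foldl (fun st (y : Nat) => pvVisitB grid man ROW COL n i (x : Int) (y : Int) st)
          st (List.range COL)) s (List.range ROW) = s ∨
      (List.foldl (fun st (x : Nat) =>
        List.foldl (fun st (y : Nat) => pvVisitB grid man ROW COL n i (x : Int) (y : Int) st)
          st (List.range COL)) s (List.range ROW)).2 = true := fun i s =>
    foldl_io _ _ (fun s' a _ hs => hmY i a s' hs) (fun s' a _ => hioY i a s') s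
  obtain ⟨hEq, hPerI⟩ := foldl_fix
    (fun st (i : Nat) => List.foldl (fun st (x : Nat) =>
      List.foldl (fun st (y : Nat) => pvVisitB grid man ROW COL n i (x : Int) (y : Int) st)
        st (List.range COL)) st (List.range ROW)) (List.range (n + 1))
    (fun s a _ hs => hmX a s hs) (fun s a _ => hioX a s) d h
  refine ⟨by rw [show pvSweepB grid man ROW COL n d = (d, false) from hEq], ?_⟩
  intro i hi x hx y hy
  have hI := hPerI i (List.mem_range.mpr hi)
  obtain ⟨-, hPerX⟩ := foldl_fix _ (List.range ROW)
    (fun s a _ hs => hmY i a s hs) (fun s a _ => hioY i a s) d (by rw [hI])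
  have hX := hPerX x (List.mem_range.mpr hx)
  obtain ⟨-, hPerY⟩ := foldl_fix _ (List.range COL)
    (fun s a _ hs => visitB_mono hs) (fun s a _ => visitB_io s) d (by rw [hX])
  exact hPerY y (List.mem_range.mpr hy)

theorem sweepB_stable {grid : List (List Char)} {man : List Char} {ROW COL n : Nat}
    {d : List (List Nat)}
    (hv : ∀ i, i < n + 1 → ∀ x, x < ROW → ∀ y, y < COL →
      pvVisitB grid man ROW COL n i (x : Int) (y : Int) (d, false) = (d, false)) :
    StableT grid man ROW COL n (fun i x y => dget d i (pvCell COL x y)) := by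
  intro i x y j a b hedge
  obtain ⟨hb1, hb2, hin, hd⟩ := hedge
  rcases hd with ⟨hji, dxy, hm, hax, hby⟩ | ⟨hji, hax, hby, hchar⟩
  · rcases hji.symm with rfl
    subst hax; subst hby
    obtain ⟨an, bn, ha, hb, hA, hB⟩ := box_coords hb2
    obtain ⟨hp1, hp2, hp3, hp4⟩ := hb1
    have hfix := (visitB_fix (hv i (by omega) an hA bn hB)).2 hin (-dxy.1, -dxy.2) (dir4_neg hm)
    show dget d i (pvCell COL (x + dxy.1) (y + dxy.2)) ≤ dget d i (pvCell COL x y) + 1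
    rw [ha, hb]
    by_contra hgt
    apply hfix
    have hx0 : (an : Int) + -dxy.1 = x := by omega
    have hy0 : (bn : Int) + -dxy.2 = y := by omega
    refine ⟨?_, ?_, ?_, ?_, ?_⟩
    · show (0 : Int) ≤ (an : Int) + -dxy.1; omega
    · show (an : Int) + -dxy.1 < (ROW : Int); rw [hx0]; exact hp2
    · show (0 : Int) ≤ (bn : Int) + -dxy.2; omega
    · show (bn : Int) + -dxy.2 < (COL : Int); rw [hy0]; exact hp4
    · show dget d i (pvCell COL ((an : Int) + -dxy.1) ((bn : Int) + -dxy.2)) + 1 <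
        dget d i (pvCell COL (an : Int) (bn : Int))
      rw [hx0, hy0]
      omega
  · subst hji
    rcases hax.symm with rfl
    rcases hby.symm with rfl
    obtain ⟨xn, yn, hxx, hyy, hX, hY⟩ := box_coords hb1
    have hfix := (visitB_fix (hv (i + 1) (by omega) xn hX yn hY)).1
    show dget d (i + 1) (pvCell COL x y) ≤ dget d i (pvCell COL x y) + 1
    rw [hxx, hyy]
    by_contra hgt
    apply hfix
    refine ⟨by omega, ?_, ?_⟩
    · rw [show i + 1 - 1 = i from rfl, ← hxx, ← hyy]
      exact hchar
    · rw [show i + 1 - 1 = i from rfl]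
      omega

theorem loopFixB_res (grid : List (List Char)) (man : List Char) (ROW COL n : Nat) :
    ∀ d, InvB grid man ROW COL n d →
    InvB grid man ROW COL n (pvLoopFixB grid man ROW COL n d) ∧
    StableT grid man ROW COL n
      (fun i x y => dget (pvLoopFixB grid man ROW COL n d) i (pvCell COL x y)) := by
  intro d
  induction d using pvLoopFixB.induct grid man ROW COL n with
  | case1 d r htrue ih =>
    intro hinv
    rw [pvLoopFixB]
    rw [if_pos (show (pvSweepB grid man ROW COL n d).2 = true from htrue)]
    exact ih (sweepB_inv hinv)
  | case2 d r hfalse =>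
    intro hinv
    rw [pvLoopFixB]
    have hfl : (pvSweepB grid man ROW COL n d).2 = false := by
      have : ¬ (pvSweepB grid man ROW COL n d).2 = true := hfalse
      simpa using this
    have hr1 : (pvSweepB grid man ROW COL n d).1 = d := by
      rcases sweepB_SweepP grid man ROW COL n d with ⟨h1, _⟩ | ⟨ht, _⟩
      · exact h1
      · rw [hfl] at ht; exact absurd ht (by simp)
    obtain ⟨-, hvfix⟩ := sweepB_fix hfl
    rw [if_neg (show ¬ (pvSweepB grid man ROW COL n d).2 = true from hfalse)]
    rw [hr1]
    exact ⟨hinv, sweepB_stable hvfix⟩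

-- ===== the initial tables =====
theorem getD_replicate' {α : Type} (k : Nat) (a dflt : α) (c : Nat) :
    (List.replicate k a).getD c dflt = if c < k then a else dflt := by
  rw [List.getD_eq_getElem?_getD, List.getElem?_replicate]
  split <;> rfl

theorem dget_d0 (M K c j : Nat) (hM : 0 < M) (hK : 0 < K) :
    dget (dset (List.replicate M (List.replicate K pvINF)) 0 0 0) c j =
      if c = 0 ∧ j = 0 then 0 else if c < M ∧ j < K then pvINF else 0 := by
  unfold dget dset
  have hrow0 : (List.replicate M (List.replicate K pvINF)).getD 0 [] =
      List.replicate K pvINF := by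
    rw [getD_replicate']
    rw [if_pos hM]
  by_cases hc : c = 0
  · subst hc
    rw [hrow0, list_getD_set_self _ _ _ _ (by simpa using hM)]
    by_cases hj : j = 0
    · subst hj
      rw [list_getD_set_self _ _ _ _ (by simpa using hK)]
      simp
    · rw [list_getD_set_ne _ _ _ _ _ (fun h => hj h.symm), getD_replicate']
      simp only [hj, and_false, if_false]
      split <;> simp_all
  · rw [list_getD_set_ne _ _ _ _ _ (fun h => hc h.symm), getD_replicate']
    simp only [hc, false_and, if_false]
    by_cases hcM : c < M
    · rw [if_pos hcM, getD_replicate']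
      split <;> simp_all
    · rw [if_neg hcM]
      simp_all [List.getD]

theorem len_d0 (M K : Nat) :
    (dset (List.replicate M (List.replicate K pvINF)) 0 0 0).length = M := by
  simp [dset]

theorem rows_d0 (M K c : Nat) (hc : c < M) :
    ((dset (List.replicate M (List.replicate K pvINF)) 0 0 0).getD c []).length = K := by
  unfold dset
  by_cases hc0 : c = 0
  · subst hc0
    rw [list_getD_set_self _ _ _ _ (by simpa using hc)]
    rw [getD_replicate', if_pos hc]
    simp
  · rw [list_getD_set_ne _ _ _ _ _ (fun h => hc0 h.symm), getD_replicate', if_pos hc]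
    simp

theorem pvCell00 (COL : Nat) : pvCell COL 0 0 = 0 := by simp [pvCell]

theorem invA_init (grid : List (List Char)) (man : List Char) (ROW COL n : Nat)
    (hR : 0 < ROW) (hC : 0 < COL) :
    InvA grid man ROW COL n
      (dset (List.replicate (ROW * COL) (List.replicate (n + 1) pvINF)) 0 0 0)
      [(0, 0, 0, 0)] := by
  have hM : 0 < ROW * COL := Nat.mul_pos hR hC
  have hbox00 : InBoxP ROW COL 0 0 := ⟨le_refl _, by exact_mod_cast hR, le_refl _, by exact_mod_cast hC⟩
  refine ⟨len_d0 _ _, fun c hc => rows_d0 _ _ c hc, ?_, ?_, ?_, ?_, ?_⟩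
  · intro c j
    rw [dget_d0 _ _ c j hM (by omega)]
    split
    · omega
    · split <;> omega
  · rw [dget_d0 _ _ 0 0 hM (by omega)]
    simp
  · intro i x y hbox hi hfin
    by_cases hsrc : pvCell COL x y = 0 ∧ i = 0
    · obtain ⟨hcell, rfl⟩ := hsrc
      obtain ⟨rfl, rfl⟩ := pvCell_inj hbox hbox00 (by rw [hcell, pvCell00])
      exact Or.inl ⟨rfl, rfl, rfl⟩
    · exfalso
      simp only at hfin
      rw [dget_d0 _ _ _ _ hM (by omega)] at hfin
      rw [if_neg hsrc, if_pos ⟨pvCell_lt hbox, by omega⟩] at hfin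
      omega
  · intro e he
    simp only [List.mem_singleton] at he
    subst he
    refine ⟨hbox00, Nat.zero_le n, ?_⟩
    show dget _ (pvCell COL 0 0) 0 ≤ 0
    rw [pvCell00, dget_d0 _ _ 0 0 hM (by omega)]
    simp
  · intro i x y hbox hi
    by_cases hsrc : i = 0 ∧ x = 0 ∧ y = 0
    · obtain ⟨rfl, rfl, rfl⟩ := hsrc
      refine Or.inr ?_
      rw [pvCell00, dget_d0 _ _ 0 0 hM (by omega)]
      simp
    · refine Or.inl (fun j a b hedge => ?_)
      have hval : dget (dset (List.replicate (ROW * COL) (List.replicate (n + 1) pvINF)) 0 0 0)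
          (pvCell COL x y) i = pvINF := by
        rw [dget_d0 _ _ _ _ hM (by omega)]
        rw [if_neg ?_, if_pos ⟨pvCell_lt hbox, by omega⟩]
        rintro ⟨hcell, rfl⟩
        obtain ⟨rfl, rfl⟩ := pvCell_inj hbox hbox00 (by rw [hcell, pvCell00])
        exact hsrc ⟨rfl, rfl, rfl⟩
      rw [hval]
      have : dget (dset (List.replicate (ROW * COL) (List.replicate (n + 1) pvINF)) 0 0 0)
          (pvCell COL a b) j ≤ pvINF := by
        rw [dget_d0 _ _ _ _ hM (by omega)]
        split
        · omega
        · split <;> omega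
      omega

theorem invB_init (grid : List (List Char)) (man : List Char) (ROW COL n : Nat)
    (hR : 0 < ROW) (hC : 0 < COL) :
    InvB grid man ROW COL n
      (dset (List.replicate (n + 1) (List.replicate (ROW * COL) pvINF)) 0 0 0) := by
  have hM : 0 < ROW * COL := Nat.mul_pos hR hC
  have hbox00 : InBoxP ROW COL 0 0 := ⟨le_refl _, by exact_mod_cast hR, le_refl _, by exact_mod_cast hC⟩
  refine ⟨len_d0 _ _, fun j hj => rows_d0 _ _ j hj, ?_, ?_, ?_⟩
  · intro j c
    rw [dget_d0 _ _ j c (by omega) hM]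
    split
    · omega
    · split <;> omega
  · rw [dget_d0 _ _ 0 0 (by omega) hM]
    simp
  · intro i x y hbox hi hfin
    by_cases hsrc : i = 0 ∧ pvCell COL x y = 0
    · obtain ⟨rfl, hcell⟩ := hsrc
      obtain ⟨rfl, rfl⟩ := pvCell_inj hbox hbox00 (by rw [hcell, pvCell00])
      exact Or.inl ⟨rfl, rfl, rfl⟩
    · exfalso
      simp only at hfin
      rw [dget_d0 _ _ _ _ (by omega) hM] at hfin
      rw [if_neg hsrc, if_pos ⟨by omega, pvCell_lt hbox⟩] at hfin
      omega

-- ===== the final line: both minima are over the same list =====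
theorem cell_surj {ROW COL c : Nat} (hC : 0 < COL) (hc : c < ROW * COL) :
    ∃ x y : Nat, x < ROW ∧ y < COL ∧ pvCell COL (x : Int) (y : Int) = c := by
  refine ⟨c / COL, c % COL, ?_, Nat.mod_lt _ hC, ?_⟩
  · rw [Nat.div_lt_iff_lt_mul hC]
    omega
  · rw [pvCell_nat]
    rw [Nat.mul_comm (c / COL) COL]
    exact Nat.div_add_mod c COL

theorem finish_eq {ROW COL n : Nat} (DA DB : List (List Nat))
    (hAlen : DA.length = ROW * COL)
    (hBrows : (DB.getD n []).length = ROW * COL)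
    (heq : ∀ c, c < ROW * COL → dget DA c n = dget DB n c) :
    pvFinish n DA = pvFinishB n DB := by
  have hlist : DA.map (fun r => r.getD n 0) = DB.getD n [] := by
    apply List.ext_getElem
    · rw [List.length_map, hAlen, hBrows]
    · intro c h1 h2
      rw [List.getElem_map]
      have hc : c < ROW * COL := by rw [List.length_map, hAlen] at h1; exact h1
      have e1 : DA[c].getD n 0 = dget DA c n := by
        unfold dget
        rw [List.getD_eq_getElem DA [] (by omega)]
      have e2 : (DB.getD n [])[c] = dget DB n c := by
        unfold dget
        rw [List.getD_eq_getElem (DB.getD n []) 0 (by omega)]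
      rw [e1, e2]
      exact heq c hc
  unfold pvFinish pvFinishB
  rw [hlist]

theorem headD_toList (matrix : List String) :
    (matrix.map String.toList).headD [] = (matrix.headD "").toList := by
  cases matrix <;> rfl

-- ===== VERDICT =====
theorem extractMantra_spec : Claim_equal_extractMantra := by
  unfold Claim_equal_extractMantra
  intro matrix mantra _ hpre
  obtain ⟨hne, hcol0, -⟩ := hpre
  unfold Spec_extractMantra
  simp only [extractMantra, extractMantra_alt, headD_toList, List.length_map]
  set grid := matrix.map String.toList with hgrid
  set man := mantra.toList with hman
  set ROW := matrix.length with hROW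
  set COL := (matrix.headD "").toList.length with hCOL
  set n := mantra.toList.length with hn
  have hR : 0 < ROW := by
    cases matrix with
    | nil => exact absurd rfl hne
    | cons a t => simp [hROW]
  have hC : 0 < COL := hcol0
  set DA := pvLoopA grid man ROW COL n
    (dset (List.replicate (ROW * COL) (List.replicate (n + 1) pvINF)) 0 0 0)
    [(0, 0, 0, 0)] with hDA
  set DB := pvLoopFixB grid man ROW COL n
    (dset (List.replicate (n + 1) (List.replicate (ROW * COL) pvINF)) 0 0 0) with hDB
  have hfinA := loopA_res grid man ROW COL n _ _ (invA_init grid man ROW COL n hR hC)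
  have hstabA := invA_nil_stable hfinA
  obtain ⟨hAlen, hArows, hAbnd, hAsrc, hAjust, -, -⟩ := hfinA
  obtain ⟨hfinB, hstabB⟩ := loopFixB_res grid man ROW COL n _ (invB_init grid man ROW COL n hR hC)
  obtain ⟨hBlen, hBrows, hBbnd, hBsrc, hBjust⟩ := hfinB
  have htab := fix_eq grid man ROW COL n
    (fun i x y => dget DA (pvCell COL x y) i) (fun i x y => dget DB i (pvCell COL x y))
    hstabA (fun i x y => hAbnd _ _)
    (by show dget DA (pvCell COL 0 0) 0 = 0; rw [pvCell00]; exact hAsrc) hAjust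
    hstabB (fun i x y => hBbnd _ _)
    (by show dget DB 0 (pvCell COL 0 0) = 0; rw [pvCell00]; exact hBsrc) hBjust
  have heq : ∀ c, c < ROW * COL → dget DA c n = dget DB n c := by
    intro c hc
    obtain ⟨x, y, hx, hy, hcell⟩ := cell_surj hC hc
    have hbox : InBoxP ROW COL (x : Int) (y : Int) :=
      ⟨by omega, by exact_mod_cast hx, by omega, by exact_mod_cast hy⟩
    have := htab n (x : Int) (y : Int) hbox (le_refl n)
    simp only at this
    rw [hcell] at this
    exact this
  exact finish_eq DA DB hAlen (hBrows n (by omega)) heq
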